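-- pv_equiv track=rewrite | github.com/alexm-nsk/cpps | src/optimizer/optimize_ir.py | right_numeration
-- ===== SOURCE A (Python) =====
-- def right_numeration (rankMap):
--     r_max=0
--     for m in rankMap.values():
--         if m[0]>r_max:
--             r_max=m[0]
--     r=0
--     nums={}
--     k=1
--     while r<=r_max:
--         for node in rankMap:
--             if (r==rankMap[node][0])and(node not in nums.values()):
--                 nums[k]=node
--                 k+=1
--         r+=1
--     return nums
-- ===== SOURCE B (Python) =====
-- def right_numeration(rankMap):
--     # Bucket nodes by rank in one pass, then emit buckets in rank order 0..r_max.
--     buckets = {}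
--     for node, m in rankMap.items():
--         buckets.setdefault(m[0], []).append(node)
--     r_max = 0
--     for m in rankMap.values():
--         if m[0] > r_max:
--             r_max = m[0]
--     nodes = []
--     for r in range(r_max + 1):
--         nodes += buckets.get(r, [])
--     return {i + 1: node for i, node in enumerate(nodes)}
-- ===== Notes on version B (the rewrite author's own statement) =====
-- stated objective: faster
-- what changed: B buckets the nodes by rank in a single pass over the dict and then emits the buckets in rank order 0..r_max, instead of A's rescan of the whole map for every rank with a per-node lookup and a linear membership test against the values collected so far.
import Mathlib
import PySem

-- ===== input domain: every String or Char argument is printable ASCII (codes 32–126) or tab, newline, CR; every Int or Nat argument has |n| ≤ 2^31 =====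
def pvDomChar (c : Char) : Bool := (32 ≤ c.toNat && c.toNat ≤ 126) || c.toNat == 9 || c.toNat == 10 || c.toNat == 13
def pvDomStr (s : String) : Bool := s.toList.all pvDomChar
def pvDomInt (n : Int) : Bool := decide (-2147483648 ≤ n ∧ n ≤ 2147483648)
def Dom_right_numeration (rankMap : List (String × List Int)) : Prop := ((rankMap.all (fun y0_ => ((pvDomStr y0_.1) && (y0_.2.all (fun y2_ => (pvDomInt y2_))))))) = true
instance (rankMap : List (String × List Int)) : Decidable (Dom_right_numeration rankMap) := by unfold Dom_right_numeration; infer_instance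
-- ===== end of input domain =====

-- B buckets nodes by rank in one pass and emits buckets in rank order, replacing A's per-rank rescans of the whole map (and its always-false membership check); equivalence of return values on dict inputs with nonempty rank lists.


-- ===== PORT A =====
-- m[0] (IndexError on [] is excluded by Pre_; .getD 0 is never the value used there)
def rnRank (m : List Int) : Int := (PySem.List.pyGet? m 0).getD 0

-- nums is a dict keyed by the strictly increasing counter k, so nums[k]=node is an append;
-- nums.values() is the map of Prod.snd.  The while loop (r=0; r<=r_max; r+=1) is the fold
-- over pyRange 0 (r_max+1) 1 (r_max ≥ 0 always, since it starts at 0 and only increases).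
def right_numeration (rankMap : List (String × List Int)) : List (Int × String) :=
  let r_max : Int :=
    rankMap.foldl (fun r_max kv => if rnRank kv.2 > r_max then rnRank kv.2 else r_max) 0
  let st :=
    (PySem.List.pyRange 0 (r_max + 1) 1).foldl (fun st r =>
      rankMap.foldl (fun (st : List (Int × String) × Int) kv =>
        if (r == rnRank (((PySem.Dict.mk rankMap).get? kv.1).getD []))
            && !((st.1.map Prod.snd).contains kv.1)
        then (st.1 ++ [(st.2, kv.1)], st.2 + 1)
        else st) st) ([], 1)
  st.1

-- ===== PORT B =====
def right_numeration_alt (rankMap : List (String × List Int)) : List (Int × String) :=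
  let buckets : PySem.Dict Int (List String) :=
    rankMap.foldl (fun d kv => d.modify (rnRank kv.2) [] (· ++ [kv.1])) PySem.Dict.empty
  let r_max : Int :=
    rankMap.foldl (fun r_max kv => if rnRank kv.2 > r_max then rnRank kv.2 else r_max) 0
  let nodes : List String :=
    (PySem.List.pyRange 0 (r_max + 1) 1).foldl (fun acc r => acc ++ buckets.getD r []) []
  (PySem.List.enumerate nodes 0).map (fun p => (p.1 + 1, p.2))

-- ===== PRECONDITION & SPEC =====
-- Pre_ excludes (a) a pair with an empty rank list, on which Python A raises IndexError (m[0]),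
-- and (b) duplicate keys, which cannot arise from a Python dict argument (dict-representation invariant).
def Pre_right_numeration (rankMap : List (String × List Int)) : Prop :=
  (∀ kv ∈ rankMap, kv.2 ≠ []) ∧ (rankMap.map Prod.fst).Nodup
instance (rankMap : List (String × List Int)) : Decidable (Pre_right_numeration rankMap) := by
  unfold Pre_right_numeration; infer_instance

def pvWitness_right_numeration : (List (String × List Int)) :=
  [("a", [1]), ("b", [0, 5]), ("c", [1]), ("d", [-2])]

def Spec_right_numeration (rankMap : List (String × List Int)) (out : List (Int × String)) : Prop := out = right_numeration_alt rankMap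
instance (rankMap : List (String × List Int)) (out : List (Int × String)) : Decidable (Spec_right_numeration rankMap out) := by unfold Spec_right_numeration; infer_instance

-- ===== CLAIM (what is proved, stated in full; the proofs are below) =====
def Claim_equal_right_numeration : Prop := ∀ (rankMap : List (String × List Int)), Dom_right_numeration rankMap → Pre_right_numeration rankMap → Spec_right_numeration rankMap (right_numeration rankMap)

-- ===== LEMMAS AND PROOFS =====

-- number k [n0, n1, …] = [(k, n0), (k+1, n1), …]  (the canonical numbering both ports produce)
def rnNumber (k : Int) : List String → List (Int × String)
  | [] => []
  | n :: ns => (k, n) :: rnNumber (k + 1) ns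

theorem rnNumber_map_snd (k : Int) (ns : List String) :
    (rnNumber k ns).map Prod.snd = ns := by
  induction ns generalizing k with
  | nil => rfl
  | cons n ns ih => simp [rnNumber, ih]

theorem rnNumber_append (k : Int) (ns ms : List String) :
    rnNumber k (ns ++ ms) = rnNumber k ns ++ rnNumber (k + ns.length) ms := by
  induction ns generalizing k with
  | nil => simp [rnNumber]
  | cons n ns ih => simp [rnNumber, ih]; ring_nf
theorem rnNumber_eq_enumerate (ns : List String) (s : Int) :
    (PySem.List.enumerate ns s).map (fun p => (p.1 + 1, p.2)) = rnNumber (s + 1) ns := by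
  induction ns generalizing s with
  | nil => simp [PySem.List.enumerate_nil, rnNumber]
  | cons n ns ih =>
      simp [PySem.List.enumerate_cons, rnNumber, ih]

theorem rn_inner (rankMap : List (String × List Int)) (r : Int) :
    ∀ (L : List (String × List Int)) (nums : List (Int × String)) (k : Int),
    (∀ kv ∈ L, (PySem.Dict.mk rankMap).get? kv.1 = some kv.2) →
    (L.map Prod.fst).Nodup →
    (∀ kv ∈ L, rnRank kv.2 = r → kv.1 ∉ nums.map Prod.snd) →
    L.foldl (fun (st : List (Int × String) × Int) kv =>
        if (r == rnRank (((PySem.Dict.mk rankMap).get? kv.1).getD []))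
            && !((st.1.map Prod.snd).contains kv.1)
        then (st.1 ++ [(st.2, kv.1)], st.2 + 1)
        else st) (nums, k)
      = (nums ++ rnNumber k ((L.filter (fun kv => rnRank kv.2 == r)).map Prod.fst),
         k + ((L.filter (fun kv => rnRank kv.2 == r)).length : Int)) := by
  intro L
  induction L with
  | nil => intro nums k _ _ _; simp [rnNumber]
  | cons kv L ih =>
      intro nums k hsub hnd hfresh
      have hget : (PySem.Dict.mk rankMap).get? kv.1 = some kv.2 := hsub kv (by simp)
      by_cases hr : rnRank kv.2 = r
      · have hmem : kv.1 ∉ nums.map Prod.snd := hfresh kv (by simp) hr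
        have hcond : ((r == rnRank (((PySem.Dict.mk rankMap).get? kv.1).getD []))
            && !((nums.map Prod.snd).contains kv.1)) = true := by
          simpa [hget, hr] using hmem
        rw [List.foldl_cons, hcond]
        simp only [if_true]
        rw [ih (nums ++ [(k, kv.1)]) (k + 1)
              (fun kv' h => hsub kv' (by simp [h]))
              (by simpa using hnd.of_cons)
              ?_]
        · have hf : (kv :: L).filter (fun kv => rnRank kv.2 == r)
              = kv :: L.filter (fun kv => rnRank kv.2 == r) := by
            simp [hr]
          rw [hf]
          simp [rnNumber, List.append_assoc]
          ring_nf
        · intro kv' h' hr'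
          have h1 : kv'.1 ∉ nums.map Prod.snd := hfresh kv' (by simp [h']) hr'
          have h2 : kv'.1 ≠ kv.1 := by
            intro he
            have : kv.1 ∈ L.map Prod.fst := he ▸ List.mem_map_of_mem h'
            exact (List.nodup_cons.mp hnd).1 this
          simp [h1, h2]
      · have hcond : ((r == rnRank (((PySem.Dict.mk rankMap).get? kv.1).getD []))
            && !((nums.map Prod.snd).contains kv.1)) = false := by
          simp [hget]
          intro h; exact absurd h.symm hr
        rw [List.foldl_cons, hcond]
        simp only [Bool.false_eq_true, if_false]
        rw [ih nums k (fun kv' h => hsub kv' (by simp [h])) (by simpa using hnd.of_cons)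
              (fun kv' h' => hfresh kv' (by simp [h']))]
        have hf : (kv :: L).filter (fun kv => rnRank kv.2 == r)
            = L.filter (fun kv => rnRank kv.2 == r) := by
          simp [hr]
        rw [hf]

theorem rn_outer (rankMap : List (String × List Int))
    (hkeys : (rankMap.map Prod.fst).Nodup) :
    ∀ (rs : List Int) (nums : List (Int × String)) (k : Int),
    rs.Nodup →
    (∀ kv ∈ rankMap, rnRank kv.2 ∈ rs → kv.1 ∉ nums.map Prod.snd) →
    rs.foldl (fun st r =>
      rankMap.foldl (fun (st : List (Int × String) × Int) kv =>
        if (r == rnRank (((PySem.Dict.mk rankMap).get? kv.1).getD []))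
            && !((st.1.map Prod.snd).contains kv.1)
        then (st.1 ++ [(st.2, kv.1)], st.2 + 1)
        else st) st) (nums, k)
      = (nums ++ rnNumber k (rs.flatMap (fun r =>
            (rankMap.filter (fun kv => rnRank kv.2 == r)).map Prod.fst)),
         k + ((rs.flatMap (fun r =>
            (rankMap.filter (fun kv => rnRank kv.2 == r)).map Prod.fst)).length : Int)) := by
  have hsub : ∀ kv ∈ rankMap, (PySem.Dict.mk rankMap).get? kv.1 = some kv.2 := by
    intro kv h
    exact PySem.Dict.get?_of_mem_items _
      (show ((kv.1, kv.2) : String × List Int) ∈ (PySem.Dict.mk rankMap).items by simpa using h)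
      (by simpa [PySem.Dict.keys] using hkeys)
  intro rs
  induction rs with
  | nil => intro nums k _ _; simp [rnNumber]
  | cons r rs ih =>
      intro nums k hnd hfresh
      rw [List.foldl_cons,
          rn_inner rankMap r rankMap nums k hsub hkeys
            (fun kv h hr => hfresh kv h (by simp [hr]))]
      rw [ih _ _ hnd.of_cons ?_]
      · rw [List.flatMap_cons, rnNumber_append]
        simp [List.append_assoc]
        ring_nf
      · intro kv h hr
        simp only [List.map_append, rnNumber_map_snd, List.mem_append]
        rintro (h1 | h2)
        · exact hfresh kv h (by simp [hr]) h1
        · obtain ⟨kv', hkv', hfst⟩ := List.mem_map.mp h2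
          have hkv'' : kv' ∈ rankMap ∧ rnRank kv'.2 = r := by
            have := List.mem_filter.mp hkv'
            exact ⟨this.1, by simpa using this.2⟩
          have : kv = kv' :=
            List.inj_on_of_nodup_map hkeys h hkv''.1 hfst.symm
          have : rnRank kv.2 = r := this ▸ hkv''.2
          exact (List.nodup_cons.mp hnd).1 (this ▸ hr)

theorem rn_bucket (rankMap : List (String × List Int)) (r : Int) :
    (rankMap.foldl (fun d kv => d.modify (rnRank kv.2) [] (· ++ [kv.1]))
        PySem.Dict.empty).getD r []
      = (rankMap.filter (fun kv => rnRank kv.2 == r)).map Prod.fst := by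
  have h := PySem.Dict.getD_foldl_modify_append
    (l := rankMap.map (fun kv => (rnRank kv.2, kv.1))) (d := PySem.Dict.empty) (c := r)
  rw [List.foldl_map] at h
  simpa [List.filter_map, Function.comp_def] using h

theorem right_numeration_spec : Claim_equal_right_numeration := by
  intro rankMap _ hpre
  obtain ⟨hne, hkeys⟩ := hpre
  show right_numeration rankMap = right_numeration_alt rankMap
  simp only [right_numeration, right_numeration_alt]
  rw [rn_outer rankMap hkeys _ [] 1 (PySem.List.nodup_pyRange_one _ _) (by simp)]
  rw [PySem.List.foldl_append_eq_flatMap]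
  rw [rnNumber_eq_enumerate _ 0]
  simp only [List.nil_append, zero_add]
  congr 1
  refine List.flatMap_congr ?_
  intro r _
  rw [rn_bucket]
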